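-- pv_equiv track=rewrite | github.com/davidmargolin/Mem-Track | main/compiler.py | read_head
-- ===== SOURCE A (Python) =====
-- def read_head(line):
--     words = ['', '', '', '']
--     i = 0
--     for char in line:
--         if char != ' ' and char != '(' and char != ')':
--             words[i] = words[i] + str(char)
--         else:
--             i = i + 1
--             if char == ')':
--                 break
--     return words
-- ===== SOURCE B (Python) =====
-- def read_head(line):
--     head = line.split(')')[0]
--     parts = head.replace('(', ' ').split(' ')
--     return (parts + ['', '', '', ''])[:4]
-- ===== Notes on version B (the rewrite author's own statement) =====
-- stated objective: faster
-- what changed: B replaces A's single character loop with running slot index and repeated string concatenation by a string-method pipeline: cut the line at the first ')', turn '(' into ' ', split on ' ' without collapsing, and pad/truncate the pieces to four; Pre_ excludes exactly the lines on which A raises IndexError (a non-delimiter character after four or more ' '/'(' delimiters before the first ')').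
import Mathlib
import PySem

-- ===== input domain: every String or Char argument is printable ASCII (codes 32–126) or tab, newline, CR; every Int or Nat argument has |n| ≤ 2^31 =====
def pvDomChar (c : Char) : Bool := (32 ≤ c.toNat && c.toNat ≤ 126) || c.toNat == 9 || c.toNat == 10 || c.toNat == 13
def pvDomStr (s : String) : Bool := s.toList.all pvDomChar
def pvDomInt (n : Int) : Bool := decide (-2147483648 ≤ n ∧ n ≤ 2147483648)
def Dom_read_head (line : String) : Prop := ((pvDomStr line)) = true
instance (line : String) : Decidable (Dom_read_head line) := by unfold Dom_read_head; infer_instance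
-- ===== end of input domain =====

-- B replaces A's indexed character loop by a string-method pipeline (cut at ')', map '(' to ' ',
-- split on ' ', pad/truncate to four); Pre_ excludes exactly the lines where Python A raises IndexError.

-- ===== PORT A =====
-- A's loop: append non-delimiter chars to words[i], bump i on ' '/'(' , bump-and-break on ')'.
def readHeadLoopA : List Char → List (List Char) → Nat → List (List Char)
  | [], words, _ => words
  | c :: rest, words, i =>
    if c ≠ ' ' ∧ c ≠ '(' ∧ c ≠ ')' then
      -- words[i] = words[i] + str(char)
      readHeadLoopA rest (words.set i (words.getD i [] ++ [c])) i
    else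
      -- i = i + 1; if char == ')': break
      if c = ')' then words else readHeadLoopA rest words (i + 1)

def read_head (line : String) : List String :=
  (readHeadLoopA line.toList [[], [], [], []] 0).map String.ofList

-- ===== PORT B =====
def read_head_alt (line : String) : List String :=
  -- head = line.split(')')[0]   (split never returns an empty list, so [0] is its head)
  let head := (PySem.Chars.splitOn line.toList [')']).headD []
  -- parts = head.replace('(', ' ').split(' ')
  let parts := PySem.Chars.splitOn (PySem.Chars.replace head ['('] [' ']) [' ']
  -- return (parts + ['', '', '', ''])[:4]
  ((parts.map String.ofList) ++ ["", "", "", ""]).take 4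

-- ===== PRECONDITION & SPEC =====
def pvDelim (c : Char) : Bool := c = ' ' ∨ c = '('

-- Pre_ excludes exactly the inputs where Python A raises IndexError: a non-delimiter
-- character occurring, before the first ')', after four or more ' '/'(' delimiters.
def Pre_read_head (line : String) : Prop :=
  ∀ i, (h : i < (line.toList.takeWhile (· ≠ ')')).length) →
    ¬ pvDelim ((line.toList.takeWhile (· ≠ ')'))[i]) = true →
    ((line.toList.takeWhile (· ≠ ')')).take i).countP pvDelim ≤ 3
instance (line : String) : Decidable (Pre_read_head line) := by unfold Pre_read_head; infer_instance

def pvWitness_read_head : String := "ab cd(ef gh)x"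

def Spec_read_head (line : String) (out : List String) : Prop := out = read_head_alt line
instance (line : String) (out : List String) : Decidable (Spec_read_head line out) := by unfold Spec_read_head; infer_instance

-- ===== CLAIM (what is proved, stated in full; the proofs are below) =====
def Claim_equal_read_head : Prop := ∀ (line : String), Dom_read_head line → Pre_read_head line → Spec_read_head line (read_head line)

-- ===== LEMMAS AND PROOFS =====

-- structural single-char split (no collapsing): sep character d
def pvSplit1 (d : Char) : List Char → List (List Char)
  | [] => [[]]
  | c :: rest =>
    if c = d then [] :: pvSplit1 d rest
    else ((c :: (pvSplit1 d rest).headD []) :: (pvSplit1 d rest).tail)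

-- structural split on the delimiter set {' ', '('}
def pvSplitD : List Char → List (List Char)
  | [] => [[]]
  | c :: rest =>
    if pvDelim c then [] :: pvSplitD rest
    else ((c :: (pvSplitD rest).headD []) :: (pvSplitD rest).tail)

-- A's loop reorganised: segments of the prefix before ')', split on ' '/'('
def pvSegsP : List Char → List (List Char)
  | [] => [[]]
  | c :: rest =>
    if c = ')' then [[]]
    else if c = ' ' ∨ c = '(' then [] :: pvSegsP rest
    else ((c :: (pvSegsP rest).headD []) :: (pvSegsP rest).tail)

-- proof-only unconditional fill: words[idx] += segment idx
def pvFillU : List (List Char) → Nat → List (List Char) → List (List Char)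
  | [], _, words => words
  | seg :: rest, idx, words =>
    pvFillU rest (idx + 1) (words.set idx (words.getD idx [] ++ seg))

theorem pvSplit1_ne_nil (d : Char) (cs : List Char) : pvSplit1 d cs ≠ [] := by
  cases cs with
  | nil => simp [pvSplit1]
  | cons c rest => simp only [pvSplit1]; split_ifs <;> simp

theorem pvSegsP_ne_nil (cs : List Char) : pvSegsP cs ≠ [] := by
  cases cs with
  | nil => simp [pvSegsP]
  | cons c rest => simp only [pvSegsP]; split_ifs <;> simp

-- mapHead used to state the splitOn.go invariant
def pvMapHead (f : List Char → List Char) : List (List Char) → List (List Char)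
  | [] => [f []]
  | h :: t => f h :: t

-- PySem's fuelled splitOn.go for a one-character separator computes pvSplit1
theorem splitOn_go_single (d : Char) (cs : List Char) :
    ∀ (fuel : Nat) (cur : List Char) (acc : List (List Char)), cs.length ≤ fuel →
      PySem.Chars.splitOn.go [d] fuel cs cur acc =
        acc.reverse ++ pvMapHead (fun x => cur.reverse ++ x) (pvSplit1 d cs) := by
  induction cs with
  | nil =>
    intro fuel cur acc _
    cases fuel <;> simp [PySem.Chars.splitOn.go, pvSplit1, pvMapHead]
  | cons c rest ih =>
    intro fuel cur acc hf
    cases fuel with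
    | zero => simp at hf
    | succ n =>
      simp only [PySem.Chars.splitOn.go]
      by_cases hc : c = d
      · have hp : List.isPrefixOf [d] (c :: rest) = true := by
          simp [List.isPrefixOf, hc]
        rw [if_pos hp]
        simp only [List.length_cons] at hf
        rw [show List.drop (List.length [d]) (c :: rest) = rest by simp]
        rw [ih n [] (cur.reverse :: acc) (by omega)]
        cases hs : pvSplit1 d rest with
        | nil => exact absurd hs (pvSplit1_ne_nil d rest)
        | cons h t => simp [pvSplit1, if_pos hc, pvMapHead, hs]
      · have hp : List.isPrefixOf [d] (c :: rest) = false := by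
          simp [List.isPrefixOf]; exact fun h => absurd h.symm hc
        rw [if_neg (by simp [hp])]
        simp only [List.length_cons] at hf
        rw [ih n (c :: cur) acc (by omega)]
        simp only [pvSplit1, if_neg hc]
        cases hs : pvSplit1 d rest with
        | nil => exact absurd hs (pvSplit1_ne_nil d rest)
        | cons h t => simp [pvMapHead]

theorem splitOn_single (d : Char) (cs : List Char) :
    PySem.Chars.splitOn cs [d] = pvSplit1 d cs := by
  unfold PySem.Chars.splitOn
  rw [splitOn_go_single d cs (cs.length + 1) [] [] (by omega)]
  cases hs : pvSplit1 d cs with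
  | nil => exact absurd hs (pvSplit1_ne_nil d cs)
  | cons h t => simp [pvMapHead]

-- PySem's fuelled replace.go for one-character old/new is a map
theorem replace_go_single (o n : Char) (cs : List Char) :
    ∀ (fuel : Nat) (acc : List Char), cs.length ≤ fuel →
      PySem.Chars.replace.go [o] [n] fuel cs acc =
        acc.reverse ++ cs.map (fun c => if c = o then n else c) := by
  induction cs with
  | nil =>
    intro fuel acc _
    cases fuel <;> simp [PySem.Chars.replace.go]
  | cons c rest ih =>
    intro fuel acc hf
    cases fuel with
    | zero => simp at hf
    | succ m =>
      simp only [PySem.Chars.replace.go]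
      simp only [List.length_cons] at hf
      by_cases hc : c = o
      · have hp : List.isPrefixOf [o] (c :: rest) = true := by
          simp [List.isPrefixOf, hc]
        rw [if_pos hp, show List.drop (List.length [o]) (c :: rest) = rest by simp,
            ih m _ (by omega)]
        simp [hc]
      · have hp : List.isPrefixOf [o] (c :: rest) = false := by
          simp [List.isPrefixOf]; exact fun h => absurd h.symm hc
        rw [if_neg (by simp [hp]), ih m _ (by omega)]
        simp [hc]

theorem replace_single (o n : Char) (cs : List Char) :
    PySem.Chars.replace cs [o] [n] = cs.map (fun c => if c = o then n else c) := by
  unfold PySem.Chars.replace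
  rw [if_neg (by simp), replace_go_single o n cs cs.length [] (Nat.le_refl _)]
  simp

-- the head of split-on-')' is the prefix before the first ')'
theorem pvSplit1_head (cs : List Char) :
    (pvSplit1 ')' cs).headD [] = cs.takeWhile (· ≠ ')') := by
  induction cs with
  | nil => simp [pvSplit1]
  | cons c rest ih =>
    by_cases hc : c = ')'
    · simp [pvSplit1, hc, List.takeWhile]
    · simp only [pvSplit1, if_neg hc, List.headD_cons]
      rw [List.takeWhile_cons, if_pos (by simp [hc])]
      rw [ih]

-- splitting the '('→' ' image on ' ' is splitting the original on the delimiter set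
theorem pvSplit1_map_repl (cs : List Char) :
    pvSplit1 ' ' (cs.map (fun c => if c = '(' then ' ' else c)) = pvSplitD cs := by
  induction cs with
  | nil => simp [pvSplit1, pvSplitD]
  | cons c rest ih =>
    simp only [List.map_cons]
    by_cases hd : pvDelim c
    · have : (if c = '(' then ' ' else c) = ' ' := by
        simp only [pvDelim, decide_eq_true_eq] at hd
        rcases hd with h | h <;> simp [h]
      rw [this]
      simp [pvSplit1, pvSplitD, hd, ih]
    · have hne : c ≠ '(' ∧ c ≠ ' ' := by
        simp only [pvDelim, decide_eq_true_eq] at hd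
        exact ⟨fun h => hd (Or.inr h), fun h => hd (Or.inl h)⟩
      rw [if_neg hne.1]
      simp only [pvSplit1, if_neg hne.2, pvSplitD, if_neg hd, ih]

-- A's break-at-')' segments are the delimiter split of the prefix before ')'
theorem pvSegsP_eq (cs : List Char) :
    pvSegsP cs = pvSplitD (cs.takeWhile (· ≠ ')')) := by
  induction cs with
  | nil => simp [pvSegsP, List.takeWhile, pvSplitD]
  | cons c rest ih =>
    by_cases hc : c = ')'
    · simp [pvSegsP, hc, List.takeWhile, pvSplitD]
    · rw [List.takeWhile_cons, if_pos (by simp [hc])]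
      simp only [pvSegsP, if_neg hc, pvSplitD, ih]
      by_cases hd : c = ' ' ∨ c = '('
      · rw [if_pos hd, if_pos (by simp [pvDelim]; tauto)]
      · rw [if_neg hd, if_neg (by simp [pvDelim]; tauto)]

-- set idx back to its own (possibly defaulted-[] out of range) value is a no-op
theorem pvSet_getD_self (words : List (List Char)) (i : Nat) :
    words.set i (words.getD i []) = words := by
  by_cases h : i < words.length
  · rw [List.getD_eq_getElem words [] h]; exact List.set_getElem_self h
  · exact List.set_eq_of_length_le (Nat.le_of_not_lt h)

-- A's loop is the unconditional fill of its segments (Lean's set is a no-op out of range)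
theorem readHeadLoopA_eq (cs : List Char) :
    ∀ (words : List (List Char)) (i : Nat),
      readHeadLoopA cs words i = pvFillU (pvSegsP cs) i words := by
  induction cs with
  | nil =>
    intro words i
    simp only [readHeadLoopA, pvSegsP, pvFillU, List.append_nil]
    exact (pvSet_getD_self words i).symm
  | cons c rest ih =>
    intro words i
    simp only [readHeadLoopA]
    by_cases h1 : c = ')'
    · have hne : ¬ (c ≠ ' ' ∧ c ≠ '(' ∧ c ≠ ')') := by tauto
      rw [if_neg hne, if_pos h1]
      simp only [pvSegsP, if_pos h1, pvFillU, List.append_nil]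
      exact (pvSet_getD_self words i).symm
    · by_cases h2 : c = ' ' ∨ c = '('
      · have hne : ¬ (c ≠ ' ' ∧ c ≠ '(' ∧ c ≠ ')') := by tauto
        rw [if_neg hne, if_neg h1, ih]
        simp only [pvSegsP, if_neg h1, if_pos h2, pvFillU]
        rw [List.append_nil, pvSet_getD_self]
      · have hyes : c ≠ ' ' ∧ c ≠ '(' ∧ c ≠ ')' := by tauto
        rw [if_pos hyes, ih]
        simp only [pvSegsP, if_neg h1, if_neg h2, pvFillU]
        cases hsp : pvSegsP rest with
        | nil => exact absurd hsp (pvSegsP_ne_nil rest)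
        | cons h t =>
          simp only [List.headD_cons, List.tail_cons, pvFillU]
          congr 1
          rw [List.set_set]
          by_cases hlen : i < words.length
          · rw [List.getD_eq_getElem _ [] (by simpa using hlen), List.getElem_set_self,
                List.getD_eq_getElem words [] hlen, List.append_assoc]
            simp
          · have hle : words.length ≤ i := Nat.le_of_not_lt hlen
            rw [List.set_eq_of_length_le hle, List.set_eq_of_length_le hle]

theorem pvFillU_out (segs : List (List Char)) :
    ∀ (idx : Nat) (words : List (List Char)), words.length ≤ idx →
      pvFillU segs idx words = words := by
  induction segs with
  | nil => intro idx words _; rfl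
  | cons seg rest ih =>
    intro idx words h
    simp only [pvFillU]
    rw [List.set_eq_of_length_le h]
    exact ih (idx + 1) words (by omega)

-- filling the four empty slots yields the first four segments, padded with []
theorem pvFillU_four (segs : List (List Char)) :
    pvFillU segs 0 [[], [], [], []] =
      [segs.getD 0 [], segs.getD 1 [], segs.getD 2 [], segs.getD 3 []] := by
  match segs with
  | [] => rfl
  | [a] => simp [pvFillU, List.getD]
  | [a, b] => simp [pvFillU, List.getD]
  | [a, b, c] => simp [pvFillU, List.getD]
  | [a, b, c, d] => simp [pvFillU, List.getD]
  | a :: b :: c :: d :: e :: rest =>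
    simp [pvFillU, List.getD, pvFillU_out]

-- padding-and-truncating the mapped segments is the same four slots
theorem pad_take_four (xs : List (List Char)) :
    ((xs.map String.ofList) ++ ["", "", "", ""]).take 4 =
      [xs.getD 0 [], xs.getD 1 [], xs.getD 2 [], xs.getD 3 []].map String.ofList := by
  match xs with
  | [] => rfl
  | [a] => rfl
  | [a, b] => rfl
  | [a, b, c] => rfl
  | a :: b :: c :: d :: rest => simp [List.getD]

-- ===== VERDICT (by name: the statement is the Claim_ definition above) =====
theorem read_head_spec : Claim_equal_read_head := by
  intro line _ _
  show read_head line = read_head_alt line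
  simp only [read_head, read_head_alt]
  rw [readHeadLoopA_eq, pvFillU_four, splitOn_single, splitOn_single, pvSplit1_head,
      replace_single, pvSplit1_map_repl, pvSegsP_eq, pad_take_four]
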